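-- pv_equiv track=rewrite | github.com/osu-srml/NH-Fair | src/release_benchmark/methods/lvlm/llm_utils.py | _extract_waterbird_label
-- ===== SOURCE A (Python) =====
-- def _extract_waterbird_label(text_lower):
--     """Hierarchical bird type extraction: multi-word > single-word > generic."""
--     waterbird_generic = [
--         "waterbird",
--         "water bird",
--         "aquatic bird",
--         "waterfowl",
--         "duck",
--         "goose",
--         "swan",
--         "seagull",
--         "heron",
--         "seabird",
--     ]
--     landbird_generic = [
--         "landbird",
--         "land bird",
--         "terrestrial bird",
--         "sparrow",
--         "robin",
--         "thrush",
--         "vulture",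
--         "woodlands",
--     ]
--     waterbird_kw = [
--         "albatross",
--         "tern",
--         "gull",
--         "cormorant",
--         "pelican",
--         "puffin",
--         "loon",
--         "grebe",
--         "auklet",
--         "jaeger",
--         "kittiwake",
--         "fulmar",
--         "merganser",
--         "guillemot",
--         "frigatebird",
--         "gadwall",
--         "mallard",
--     ]
--     landbird_kw = [
--         "warbler",
--         "sparrow",
--         "woodpecker",
--         "wren",
--         "jay",
--         "finch",
--         "bunting",
--         "oriole",
--         "swallow",
--         "flycatcher",
--         "tanager",
--         "grosbeak",
--         "hummingbird",
--         "crow",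
--         "raven",
--         "kingbird",
--         "nuthatch",
--         "creeper",
--         "cuckoo",
--         "thrasher",
--         "vireo",
--         "kingfisher",
--         "meadowlark",
--         "cowbird",
--         "grackle",
--         "lark",
--     ]
--
--     wb = any(kw in text_lower for kw in waterbird_kw + waterbird_generic)
--     lb = any(kw in text_lower for kw in landbird_kw + landbird_generic)
--
--     if wb and not lb:
--         return "1"
--     if lb and not wb:
--         return "0"
--     if wb and lb:
--         wb_pos = min(
--             (
--                 text_lower.find(kw)
--                 for kw in waterbird_kw + waterbird_generic
--                 if kw in text_lower
--             ),
--             default=999,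
--         )
--         lb_pos = min(
--             (
--                 text_lower.find(kw)
--                 for kw in landbird_kw + landbird_generic
--                 if kw in text_lower
--             ),
--             default=999,
--         )
--         return "1" if wb_pos < lb_pos else "0"
--     return None
-- ===== SOURCE B (Python) =====
-- def _extract_waterbird_label(text_lower):
--     """Single left-to-right scan of the text: at each index, test whether a
--     land or water keyword starts there; the first index with any match decides
--     (land wins a tie at the same index, matching min-position semantics)."""
--     WATER = (
--         "albatross", "tern", "gull", "cormorant", "pelican", "puffin", "loon",
--         "grebe", "auklet", "jaeger", "kittiwake", "fulmar", "merganser",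
--         "guillemot", "frigatebird", "gadwall", "mallard",
--         "waterbird", "water bird", "aquatic bird", "waterfowl", "duck",
--         "goose", "swan", "seagull", "heron", "seabird",
--     )
--     LAND = (
--         "warbler", "sparrow", "woodpecker", "wren", "jay", "finch", "bunting",
--         "oriole", "swallow", "flycatcher", "tanager", "grosbeak", "hummingbird",
--         "crow", "raven", "kingbird", "nuthatch", "creeper", "cuckoo",
--         "thrasher", "vireo", "kingfisher", "meadowlark", "cowbird", "grackle",
--         "lark",
--         "landbird", "land bird", "terrestrial bird", "sparrow", "robin",
--         "thrush", "vulture", "woodlands",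
--     )
--     for i in range(len(text_lower)):
--         if text_lower.startswith(LAND, i):
--             return "0"
--         if text_lower.startswith(WATER, i):
--             return "1"
--     return None
-- ===== Notes on version B (the rewrite author's own statement) =====
-- stated objective: alternative
-- what changed: B replaces A's keyword-by-keyword presence tests and conditional min-of-find re-scan with a single left-to-right scan of the text itself: the first index where any keyword starts decides the label (land wins a tie at the same index), so no per-keyword find positions are ever computed.
import Mathlib
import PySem

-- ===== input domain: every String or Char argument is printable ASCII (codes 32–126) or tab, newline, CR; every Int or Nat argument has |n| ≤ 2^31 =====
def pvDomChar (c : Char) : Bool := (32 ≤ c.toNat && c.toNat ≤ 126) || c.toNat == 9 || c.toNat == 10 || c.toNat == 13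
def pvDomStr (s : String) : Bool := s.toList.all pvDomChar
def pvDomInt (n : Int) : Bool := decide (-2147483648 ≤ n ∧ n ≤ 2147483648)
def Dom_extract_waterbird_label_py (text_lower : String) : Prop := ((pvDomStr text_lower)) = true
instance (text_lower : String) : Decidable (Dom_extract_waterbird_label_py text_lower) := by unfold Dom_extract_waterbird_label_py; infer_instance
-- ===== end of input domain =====

-- B replaces A's per-keyword presence tests and conditional min-of-find re-scan with a single
-- left-to-right scan of the text: the first index where any keyword starts decides the label
-- (land wins a tie at the same index) — objective: alternative algorithm; no speed claimed.


-- ===== PORT A =====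
def pvWaterbirdGeneric : List String :=
  ["waterbird", "water bird", "aquatic bird", "waterfowl", "duck", "goose", "swan",
   "seagull", "heron", "seabird"]
def pvLandbirdGeneric : List String :=
  ["landbird", "land bird", "terrestrial bird", "sparrow", "robin", "thrush",
   "vulture", "woodlands"]
def pvWaterbirdKw : List String :=
  ["albatross", "tern", "gull", "cormorant", "pelican", "puffin", "loon", "grebe",
   "auklet", "jaeger", "kittiwake", "fulmar", "merganser", "guillemot",
   "frigatebird", "gadwall", "mallard"]
def pvLandbirdKw : List String :=
  ["warbler", "sparrow", "woodpecker", "wren", "jay", "finch", "bunting", "oriole",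
   "swallow", "flycatcher", "tanager", "grosbeak", "hummingbird", "crow", "raven",
   "kingbird", "nuthatch", "creeper", "cuckoo", "thrasher", "vireo", "kingfisher",
   "meadowlark", "cowbird", "grackle", "lark"]

def extract_waterbird_label_py (text_lower : String) : Option String :=
  let wb := (pvWaterbirdKw ++ pvWaterbirdGeneric).any (fun kw => PySem.Str.isIn kw text_lower)
  let lb := (pvLandbirdKw ++ pvLandbirdGeneric).any (fun kw => PySem.Str.isIn kw text_lower)
  if wb && !lb then some "1"
  else if lb && !wb then some "0"
  else if wb && lb then
    let wb_pos := PySem.List.minD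
      (((pvWaterbirdKw ++ pvWaterbirdGeneric).filter (fun kw => PySem.Str.isIn kw text_lower)).map
        (fun kw => PySem.Str.find text_lower kw)) id 999
    let lb_pos := PySem.List.minD
      (((pvLandbirdKw ++ pvLandbirdGeneric).filter (fun kw => PySem.Str.isIn kw text_lower)).map
        (fun kw => PySem.Str.find text_lower kw)) id 999
    if wb_pos < lb_pos then some "1" else some "0"
  else none

-- ===== PORT B =====
def pvWater : List String :=
  ["albatross", "tern", "gull", "cormorant", "pelican", "puffin", "loon", "grebe",
   "auklet", "jaeger", "kittiwake", "fulmar", "merganser", "guillemot",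
   "frigatebird", "gadwall", "mallard",
   "waterbird", "water bird", "aquatic bird", "waterfowl", "duck", "goose", "swan",
   "seagull", "heron", "seabird"]
def pvLand : List String :=
  ["warbler", "sparrow", "woodpecker", "wren", "jay", "finch", "bunting", "oriole",
   "swallow", "flycatcher", "tanager", "grosbeak", "hummingbird", "crow", "raven",
   "kingbird", "nuthatch", "creeper", "cuckoo", "thrasher", "vireo", "kingfisher",
   "meadowlark", "cowbird", "grackle", "lark",
   "landbird", "land bird", "terrestrial bird", "sparrow", "robin", "thrush",
   "vulture", "woodlands"]

-- Python's `text.startswith(TUPLE, i)` ported by hand (PySem.Str.startswith takes no start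
-- index): any keyword of the tuple is a prefix of the suffix beginning at i — exact.
def pvStartsAny (kws : List String) (s : List Char) : Bool :=
  kws.any (fun kw => PySem.Chars.startswith s kw.toList)

-- the for-loop over i in range(len(text)): structural recursion over suffixes of the text
def pvScan : List Char → Option String
  | [] => none
  | c :: rest =>
    if pvStartsAny pvLand (c :: rest) then some "0"
    else if pvStartsAny pvWater (c :: rest) then some "1"
    else pvScan rest

def extract_waterbird_label_py_alt (text_lower : String) : Option String :=
  pvScan text_lower.toList

-- ===== PRECONDITION & SPEC =====
def Spec_extract_waterbird_label_py (text_lower : String) (out : Option String) : Prop := out = extract_waterbird_label_py_alt text_lower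
instance (text_lower : String) (out : Option String) : Decidable (Spec_extract_waterbird_label_py text_lower out) := by unfold Spec_extract_waterbird_label_py; infer_instance

-- ===== CLAIM (what is proved, stated in full; the proofs are below) =====
def Claim_equal_extract_waterbird_label_py : Prop := ∀ (text_lower : String), Dom_extract_waterbird_label_py text_lower → Spec_extract_waterbird_label_py text_lower (extract_waterbird_label_py text_lower)

-- ===== LEMMAS AND PROOFS =====

-- first position (if any) at which some keyword of K starts
def pvMinPos (K : List String) : List Char → Option Nat
  | [] => none
  | c :: rest =>
    if pvStartsAny K (c :: rest) then some 0
    else (pvMinPos K rest).map (· + 1)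

-- B's decision table on the two first-match positions
def pvDecide : Option Nat → Option Nat → Option String
  | none, none => none
  | some _, none => some "1"
  | none, some _ => some "0"
  | some w, some l => if w < l then some "1" else some "0"

lemma pvScan_eq_decide : ∀ s : List Char,
    pvScan s = pvDecide (pvMinPos pvWater s) (pvMinPos pvLand s) := by
  intro s
  induction s with
  | nil => rfl
  | cons c rest ih =>
    by_cases hl : pvStartsAny pvLand (c :: rest) = true
    · by_cases hw : pvStartsAny pvWater (c :: rest) = true <;>
        · simp only [pvScan, pvMinPos, hl, hw, if_true]
          first
          | rfl
          | (cases pvMinPos pvWater rest <;> simp [pvDecide])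
    · by_cases hw : pvStartsAny pvWater (c :: rest) = true
      · simp only [pvScan, pvMinPos, hl, hw, if_true, if_false, Bool.false_eq_true]
        cases pvMinPos pvLand rest <;> simp [pvDecide]
      · simp only [pvScan, pvMinPos, hl, hw, if_false, Bool.false_eq_true, ih]
        cases pvMinPos pvWater rest <;> cases pvMinPos pvLand rest <;>
          simp [pvDecide]

lemma pvStartsAny_iff (K : List String) (s : List Char) :
    pvStartsAny K s = true ↔ ∃ kw ∈ K, kw.toList <+: s := by
  simp [pvStartsAny, PySem.Chars.startswith_iff]

lemma pvMinPos_none (K : List String) (hK : ∀ kw ∈ K, kw.toList ≠ []) :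
    ∀ s : List Char, pvMinPos K s = none → ∀ j, pvStartsAny K (s.drop j) = false := by
  intro s
  induction s with
  | nil =>
    intro _ j
    rw [List.drop_nil]
    rw [Bool.eq_false_iff]
    intro h
    rcases (pvStartsAny_iff K []).mp h with ⟨kw, hm, hp⟩
    exact hK kw hm (List.prefix_nil.mp hp)
  | cons c rest ih =>
    intro h j
    simp only [pvMinPos] at h
    by_cases h0 : pvStartsAny K (c :: rest) = true
    · rw [if_pos h0] at h; exact absurd h (by simp)
    · rw [if_neg h0] at h
      have hrest : pvMinPos K rest = none := Option.map_eq_none_iff.mp h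
      cases j with
      | zero => simpa using h0
      | succ j => simpa using ih hrest j

lemma pvMinPos_some (K : List String) :
    ∀ (s : List Char) (j : Nat), pvMinPos K s = some j →
      pvStartsAny K (s.drop j) = true ∧ ∀ i < j, pvStartsAny K (s.drop i) = false := by
  intro s
  induction s with
  | nil => intro j h; simp [pvMinPos] at h
  | cons c rest ih =>
    intro j h
    simp only [pvMinPos] at h
    split_ifs at h with h0
    · cases h
      exact ⟨by simpa using h0, fun i hi => absurd hi (by omega)⟩
    · cases hx : pvMinPos K rest with
      | none => rw [hx] at h; simp at h
      | some j' =>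
        rw [hx] at h
        simp only [Option.map_some] at h
        injection h with h
        subst h
        rcases ih j' hx with ⟨h1, h2⟩
        refine ⟨by simpa using h1, ?_⟩
        intro i hi
        cases i with
        | zero => simpa using h0
        | succ i => simpa using h2 i (by omega)

-- presence of some keyword (A's `any`) ↔ the scan finds a position
lemma pvPresent_iff (K : List String) (hK : ∀ kw ∈ K, kw.toList ≠ []) (t : String) :
    K.any (fun kw => PySem.Str.isIn kw t) = true ↔ pvMinPos K t.toList ≠ none := by
  constructor
  · rintro h hnone
    rcases List.any_eq_true.mp h with ⟨kw, hm, hin⟩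
    rw [PySem.Str.isIn_eq] at hin
    rcases (PySem.Chars.exists_prefix_drop_iff_isIn kw.toList t.toList).mpr hin with ⟨j, hp⟩
    have := pvMinPos_none K hK t.toList hnone j
    rw [Bool.eq_false_iff] at this
    exact this ((pvStartsAny_iff _ _).mpr ⟨kw, hm, hp⟩)
  · intro h
    cases hx : pvMinPos K t.toList with
    | none => exact absurd hx h
    | some j =>
      rcases pvMinPos_some K t.toList j hx with ⟨h1, _⟩
      rcases (pvStartsAny_iff _ _).mp h1 with ⟨kw, hm, hp⟩
      refine List.any_eq_true.mpr ⟨kw, hm, ?_⟩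
      rw [PySem.Str.isIn_eq]
      exact (PySem.Chars.exists_prefix_drop_iff_isIn kw.toList t.toList).mp ⟨j, hp⟩

-- the fold underlying PySem.List.min? at key id (as in port A's minD)
def pvScanMin (L : List Int) : Option Int :=
  L.foldl (fun acc x => match acc with
    | none => some x
    | some m => if x < m then some x else some m) none

lemma pvMin?_eq_scan (L : List Int) : PySem.List.min? L id = pvScanMin L := by
  simp only [PySem.List.min?, pvScanMin, id]
  congr 1
  funext acc x
  cases acc with
  | none => rfl
  | some m => by_cases h : x < m <;> simp [h]

lemma pvMinD_eq_scan (L : List Int) : PySem.List.minD L id 999 = (pvScanMin L).getD 999 := by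
  simp only [PySem.List.minD, pvMin?_eq_scan]

lemma pvScanMin_eq_min? (L : List Int) : pvScanMin L = L.min? := by
  cases L with
  | nil => rfl
  | cons a as =>
    show List.foldl _ (some a) as = some (as.foldl min a)
    induction as generalizing a with
    | nil => rfl
    | cons b bs ih =>
      simp only [List.foldl_cons]
      rw [← ih]
      congr 1
      by_cases h : b < a <;> simp [min_def, h]

-- the minimum of the find positions of the present keywords is the first scan position
lemma pvMinFind_eq (K : List String) (t : String) (j : Nat)
    (h : pvMinPos K t.toList = some j) :
    pvScanMin ((K.filter (fun kw => PySem.Str.isIn kw t)).map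
      (fun kw => PySem.Str.find t kw)) = some (j : Int) := by
  rcases pvMinPos_some K t.toList j h with ⟨h1, h2⟩
  rcases (pvStartsAny_iff _ _).mp h1 with ⟨kw0, hm0, hp0⟩
  rw [pvScanMin_eq_min?]
  rw [List.min?_eq_some_iff]
  constructor
  · -- (j : Int) is in the list: the keyword matching at j has find = j
    rcases (pvStartsAny_iff _ _).mp h1 with ⟨kw, hm, hp⟩
    have hin : PySem.Chars.isIn kw.toList t.toList = true :=
      (PySem.Chars.exists_prefix_drop_iff_isIn _ _).mp ⟨j, hp⟩
    have hnn : 0 ≤ PySem.Chars.find t.toList kw.toList :=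
      (PySem.Chars.find_nonneg_iff _ _).mpr ((PySem.Chars.isIn_iff_infix _ _).mp hin)
    rcases PySem.Chars.find_spec hnn with ⟨hfp, hfmin⟩
    have hle : (PySem.Chars.find t.toList kw.toList).toNat ≤ j := by
      by_contra hgt
      exact absurd hp (hfmin j (by omega))
    have hge : j ≤ (PySem.Chars.find t.toList kw.toList).toNat := by
      by_contra hlt
      have hfalse := h2 (PySem.Chars.find t.toList kw.toList).toNat (by omega)
      rw [Bool.eq_false_iff] at hfalse
      exact hfalse ((pvStartsAny_iff _ _).mpr ⟨kw, hm, hfp⟩)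
    have heq : PySem.Chars.find t.toList kw.toList = (j : Int) := by omega
    refine List.mem_map.mpr ⟨kw, List.mem_filter.mpr ⟨hm, ?_⟩, ?_⟩
    · rw [PySem.Str.isIn_eq]; exact hin
    · rw [PySem.Str.find_eq]; exact heq
  · -- it is a lower bound: every present keyword's find is ≥ j
    intro x hx
    rcases List.mem_map.mp hx with ⟨kw, hmf, hfx⟩
    rcases List.mem_filter.mp hmf with ⟨hm, hin⟩
    rw [PySem.Str.isIn_eq] at hin
    rw [PySem.Str.find_eq] at hfx
    have hnn : 0 ≤ PySem.Chars.find t.toList kw.toList :=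
      (PySem.Chars.find_nonneg_iff _ _).mpr ((PySem.Chars.isIn_iff_infix _ _).mp hin)
    rcases PySem.Chars.find_spec hnn with ⟨hfp, _⟩
    have : j ≤ (PySem.Chars.find t.toList kw.toList).toNat := by
      by_contra hlt
      have hfalse := h2 (PySem.Chars.find t.toList kw.toList).toNat (by omega)
      rw [Bool.eq_false_iff] at hfalse
      exact hfalse ((pvStartsAny_iff _ _).mpr ⟨kw, hm, hfp⟩)
    omega

lemma pvWater_nonempty : ∀ kw ∈ pvWaterbirdKw ++ pvWaterbirdGeneric, kw.toList ≠ [] := by decide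
lemma pvLand_nonempty : ∀ kw ∈ pvLandbirdKw ++ pvLandbirdGeneric, kw.toList ≠ [] := by decide
lemma pvWater_eq : pvWater = pvWaterbirdKw ++ pvWaterbirdGeneric := by rfl
lemma pvLand_eq : pvLand = pvLandbirdKw ++ pvLandbirdGeneric := by rfl

-- ===== VERDICT (by name: the statement is the Claim_ definition above) =====
theorem extract_waterbird_label_py_spec : Claim_equal_extract_waterbird_label_py := by
  intro t _
  unfold Spec_extract_waterbird_label_py extract_waterbird_label_py extract_waterbird_label_py_alt
  rw [pvScan_eq_decide, pvWater_eq, pvLand_eq]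
  set W := pvWaterbirdKw ++ pvWaterbirdGeneric with hW
  set L := pvLandbirdKw ++ pvLandbirdGeneric with hL
  have hWiff := pvPresent_iff W pvWater_nonempty t
  have hLiff := pvPresent_iff L pvLand_nonempty t
  cases hw : pvMinPos W t.toList with
  | none =>
    have hA : W.any (fun kw => PySem.Str.isIn kw t) = false := by
      rw [← Bool.not_eq_true]; intro h; exact (hWiff.mp h) hw
    cases hl : pvMinPos L t.toList with
    | none =>
      have hB : L.any (fun kw => PySem.Str.isIn kw t) = false := by
        rw [← Bool.not_eq_true]; intro h; exact (hLiff.mp h) hl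
      simp only [hA, hB, Bool.and_self, Bool.not_true, Bool.not_false, Bool.and_false,
        Bool.and_true, Bool.false_and, Bool.true_and, Bool.false_eq_true, if_true, if_false,
        pvDecide, reduceIte]
    | some jl =>
      have hB : L.any (fun kw => PySem.Str.isIn kw t) = true := by
        rw [hLiff]; simp [hl]
      simp only [hA, hB, Bool.and_self, Bool.not_true, Bool.not_false, Bool.and_false,
        Bool.and_true, Bool.false_and, Bool.true_and, Bool.false_eq_true, if_true, if_false,
        pvDecide, reduceIte]
  | some jw =>
    have hA : W.any (fun kw => PySem.Str.isIn kw t) = true := by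
      rw [hWiff]; simp [hw]
    cases hl : pvMinPos L t.toList with
    | none =>
      have hB : L.any (fun kw => PySem.Str.isIn kw t) = false := by
        rw [← Bool.not_eq_true]; intro h; exact (hLiff.mp h) hl
      simp only [hA, hB, Bool.and_self, Bool.not_true, Bool.not_false, Bool.and_false,
        Bool.and_true, Bool.false_and, Bool.true_and, Bool.false_eq_true, if_true, if_false,
        pvDecide, reduceIte]
    | some jl =>
      have hB : L.any (fun kw => PySem.Str.isIn kw t) = true := by
        rw [hLiff]; simp [hl]
      have hmw := pvMinFind_eq W t jw hw
      have hml := pvMinFind_eq L t jl hl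
      simp only [hA, hB, Bool.and_self, Bool.not_true, Bool.and_false, Bool.false_eq_true,
        if_false, if_true, pvMinD_eq_scan, hmw, hml, Option.getD_some, pvDecide]
      by_cases hlt : jw < jl
      · rw [if_pos (by exact_mod_cast hlt), if_pos hlt]
      · rw [if_neg (by exact_mod_cast hlt), if_neg hlt]
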